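-- pv_equiv track=rewrite | github.com/npalgit/project_mountain_view | dynamicProgramming/movieRatings.py | maxRatings
-- ===== SOURCE A (Python) =====
-- def maxRatings(ratings):
--     if not ratings: return 0
--     if len(ratings) < 2:
--         return max(0, ratings[0])
--
--     dp = [0]*(len(ratings))
--     dp[0] = ratings[0]
--     dp[1] = max(ratings[1], ratings[0]+ratings[1])
--
--     for i in range(2, len(ratings)):
--         dp[i] = max(dp[i-1], dp[i-2])+ratings[i]
--
--     return max(dp[-1],dp[-2])
-- ===== SOURCE B (Python) =====
-- def maxRatings(ratings):
--     if not ratings: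
--         return 0
--     if len(ratings) < 2:
--         return max(0, ratings[0])
--     # Duality: a valid chain (start in first two, end in last two, gaps <= 2)
--     # is exactly the complement of an independent set of skipped indices
--     # (no two adjacent skips), so answer = total - min-sum independent set.
--     take, skip = 0, 0
--     for x in ratings:
--         take, skip = skip + x, min(take, skip)
--     return sum(ratings) - min(take, skip)
-- ===== Notes on version B (the rewrite author's own statement) =====
-- stated objective: alternative
-- what changed: B solves the dual problem: a valid chain (start in the first two indices, end in the last two, gaps at most 2) is exactly the complement of an independent set of skipped indices (no two adjacent skips), so B returns total sum minus the minimum-sum independent set, computed by a take/skip min-DP, instead of A's forward max-chain dp array.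
import Mathlib
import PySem

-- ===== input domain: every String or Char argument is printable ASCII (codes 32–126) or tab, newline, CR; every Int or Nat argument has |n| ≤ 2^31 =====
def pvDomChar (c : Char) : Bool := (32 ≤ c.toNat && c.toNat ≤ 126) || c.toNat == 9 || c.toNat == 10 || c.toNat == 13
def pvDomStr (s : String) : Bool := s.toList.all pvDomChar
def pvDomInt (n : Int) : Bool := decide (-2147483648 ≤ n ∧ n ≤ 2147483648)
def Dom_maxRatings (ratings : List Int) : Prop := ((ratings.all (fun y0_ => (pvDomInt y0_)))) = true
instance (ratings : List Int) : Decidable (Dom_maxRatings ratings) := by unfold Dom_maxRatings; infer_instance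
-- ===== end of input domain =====

-- B solves the dual problem: the answer is the total sum minus the minimum-sum
-- independent set of skipped indices (no two adjacent skips), computed by a
-- take/skip min-DP, instead of A's forward max-chain dp array; same value.

-- ===== PORT A =====
def maxRatings (ratings : List Int) : Int :=
  if ratings = [] then 0
  else if ratings.length < 2 then
    max 0 (PySem.List.pyGetD ratings 0 0)
  else
    let dp0 := List.replicate ratings.length (0 : Int)
    let dp1 := PySem.List.pySetD dp0 0 (PySem.List.pyGetD ratings 0 0)
    let dp2 := PySem.List.pySetD dp1 1 (max (PySem.List.pyGetD ratings 1 0)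
                 (PySem.List.pyGetD ratings 0 0 + PySem.List.pyGetD ratings 1 0))
    let dp := (PySem.List.pyRange 2 ratings.length 1).foldl
      (fun dp i =>
        PySem.List.pySetD dp i
          (max (PySem.List.pyGetD dp (i-1) 0) (PySem.List.pyGetD dp (i-2) 0)
            + PySem.List.pyGetD ratings i 0)) dp2
    max (PySem.List.pyGetD dp (-1) 0) (PySem.List.pyGetD dp (-2) 0)

-- ===== PORT B =====
def maxRatings_alt (ratings : List Int) : Int :=
  if ratings = [] then 0
  else if ratings.length < 2 then
    max 0 (PySem.List.pyGetD ratings 0 0)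
  else
    let p := ratings.foldl (fun (s : Int × Int) x => (s.2 + x, min s.1 s.2)) ((0:Int), (0:Int))
    ratings.sum - min p.1 p.2

-- ===== PRECONDITION & SPEC =====
def Spec_maxRatings (ratings : List Int) (out : Int) : Prop := out = maxRatings_alt ratings
instance (ratings : List Int) (out : Int) : Decidable (Spec_maxRatings ratings out) := by unfold Spec_maxRatings; infer_instance

-- ===== CLAIM (what is proved, stated in full; the proofs are below) =====
def Claim_equal_maxRatings : Prop := ∀ (ratings : List Int), Dom_maxRatings ratings → Spec_maxRatings ratings (maxRatings ratings)

-- ===== LEMMAS AND PROOFS =====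

-- dRec r j = the chain recurrence A computes (best chain-sum ending at index j)
def dRec (r : List Int) : Nat → Int
  | 0 => r.getD 0 0
  | 1 => max (r.getD 1 0) (r.getD 0 0 + r.getD 1 0)
  | (k+2) => max (dRec r (k+1)) (dRec r k) + r.getD (k+2) 0

def dpAt (r : List Int) (k : Nat) : List Int :=
  (List.range r.length).map (fun j => if j < k then dRec r j else 0)

theorem getElem_dpAt (r : List Int) (k j : Nat) (h : j < r.length) :
    (dpAt r k)[j]'(by simp [dpAt, h]) = if j < k then dRec r j else 0 := by
  simp [dpAt]

theorem dpAt_init (r : List Int) (h : 2 ≤ r.length) :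
    PySem.List.pySetD
      (PySem.List.pySetD (List.replicate r.length (0 : Int)) 0 (PySem.List.pyGetD r 0 0)) 1
      (max (PySem.List.pyGetD r 1 0) (PySem.List.pyGetD r 0 0 + PySem.List.pyGetD r 1 0))
      = dpAt r 2 := by
  have h0 : PySem.List.pyGetD r 0 0 = r.getD 0 0 := by
    simp [PySem.List.pyGetD_zero]
  have h1 : PySem.List.pyGetD r 1 0 = r.getD 1 0 := by
    rw [show (1:Int) = ((1:Nat):Int) by norm_num, PySem.List.pyGetD_natCast]
  rw [show (0:Int) = ((0:Nat):Int) by norm_num, PySem.List.pySetD_natCast,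
      show (1:Int) = ((1:Nat):Int) by norm_num, PySem.List.pySetD_natCast]
  apply List.ext_getElem
  · simp [dpAt]
  · intro j hj hj'
    simp only [dpAt, List.getElem_map, List.getElem_range] at *
    simp only [List.length_set, List.length_replicate] at hj
    rcases j with _ | _ | j
    · simp [dRec, h0]
    · simp [dRec, h1, h0]
    · simp [List.getElem_replicate]

theorem dpAt_step (r : List Int) (i : Int) (h2 : 2 ≤ i) (hn : i < (r.length : Int)) :
    PySem.List.pySetD (dpAt r i.toNat) i
      (max (PySem.List.pyGetD (dpAt r i.toNat) (i-1) 0)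
           (PySem.List.pyGetD (dpAt r i.toNat) (i-2) 0)
        + PySem.List.pyGetD r i 0)
      = dpAt r (i.toNat + 1) := by
  have hlen : (dpAt r i.toNat).length = r.length := by simp [dpAt]
  have hg1 : PySem.List.pyGetD (dpAt r i.toNat) (i-1) 0 = dRec r (i.toNat - 1) := by
    rw [PySem.List.pyGetD_eq_getElem _ _ (by omega) (by rw [hlen]; omega)]
    rw [getElem_dpAt r i.toNat ((i-1).toNat) (by omega)]
    rw [if_pos (by omega)]
    congr 1; omega
  have hg2 : PySem.List.pyGetD (dpAt r i.toNat) (i-2) 0 = dRec r (i.toNat - 2) := by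
    rw [PySem.List.pyGetD_eq_getElem _ _ (by omega) (by rw [hlen]; omega)]
    rw [getElem_dpAt r i.toNat ((i-2).toNat) (by omega)]
    rw [if_pos (by omega)]
    congr 1; omega
  have hgr : PySem.List.pyGetD r i 0 = r.getD i.toNat 0 := by
    rw [PySem.List.pyGetD_eq_getElem _ _ (by omega) (by omega)]
    rw [List.getD_eq_getElem r 0 (by omega)]
  rw [hg1, hg2, hgr, PySem.List.pySetD_of_nonneg _ _ (by omega)]
  apply List.ext_getElem
  · simp [dpAt]
  · intro j hj hj'
    simp only [dpAt, List.getElem_map, List.getElem_range]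
    simp only [List.length_set, hlen] at hj
    rw [List.getElem_set]
    by_cases hji : j = i.toNat
    · rw [if_pos hji.symm, if_pos (by omega)]
      rw [← hji]
      obtain ⟨k, rfl⟩ : ∃ k, j = k + 2 := ⟨j - 2, by omega⟩
      simp [dRec]
    · rw [if_neg (fun h => hji h.symm)]
      simp only [List.getElem_map, List.getElem_range]
      by_cases hlt : j < i.toNat
      · rw [if_pos hlt, if_pos (by omega)]
      · rw [if_neg hlt, if_neg (by omega)]

theorem loopA (r : List Int) (m : Nat) (hm : 2 + m ≤ r.length) :
    ((List.range m).map (fun k : Nat => (2 : Int) + (k : Int))).foldl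
      (fun dp i =>
        PySem.List.pySetD dp i
          (max (PySem.List.pyGetD dp (i-1) 0) (PySem.List.pyGetD dp (i-2) 0)
            + PySem.List.pyGetD r i 0)) (dpAt r 2)
      = dpAt r (2 + m) := by
  induction m with
  | zero => simp
  | succ m ih =>
    rw [List.range_succ, List.map_append, List.foldl_append, ih (by omega)]
    simp only [List.map_cons, List.map_nil, List.foldl_cons, List.foldl_nil]
    have hstep := dpAt_step r ((2:Int)+m) (by omega) (by omega)
    rw [show ((2:Int)+(m:Int)).toNat = 2+m by omega] at hstep
    rw [hstep, show 2+m+1 = 2+(m+1) from rfl]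

theorem A_eq (r : List Int) (h : 2 ≤ r.length) :
    maxRatings r = max (dRec r (r.length - 1)) (dRec r (r.length - 2)) := by
  have hnil : r ≠ [] := by intro e; subst e; simp at h
  unfold maxRatings
  rw [if_neg hnil, if_neg (by omega)]
  have hrange : PySem.List.pyRange 2 (r.length : Int) 1
      = (List.range (r.length - 2)).map (fun k : Nat => (2 : Int) + (k : Int)) := by
    rw [PySem.List.pyRange_one,
        show ((r.length:Int) - 2).toNat = r.length - 2 by omega]
  simp only [dpAt_init r h, hrange, loopA r (r.length - 2) (by omega)]
  rw [show 2 + (r.length - 2) = r.length by omega]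
  have hL : (dpAt r r.length).length = r.length := by simp [dpAt]
  rw [PySem.List.pyGetD_neg_ofNat _ 1 0 (by omega) (by rw [hL]; omega)]
  rw [PySem.List.pyGetD_neg_ofNat _ 2 0 (by omega) (by rw [hL]; omega)]
  simp only [hL]
  rw [getElem_dpAt r r.length (r.length - 1) (by omega)]
  rw [getElem_dpAt r r.length (r.length - 2) (by omega)]
  rw [if_pos (by omega), if_pos (by omega)]

-- B's fold invariant: after j elements the (take, skip) state is
-- ((take j).sum − dRec (j−2), (take j).sum − dRec (j−1)).
theorem loopB (r : List Int) (t : List Int) (j : Nat)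
    (ht : t = r.drop j) (hj : 2 ≤ j) (hjl : j ≤ r.length) :
    t.foldl (fun (s : Int × Int) x => (s.2 + x, min s.1 s.2))
      ((r.take j).sum - dRec r (j-2), (r.take j).sum - dRec r (j-1))
      = ((r.take r.length).sum - dRec r (r.length-2),
         (r.take r.length).sum - dRec r (r.length-1)) := by
  induction t generalizing j with
  | nil =>
    have hge : r.length ≤ j := by
      have := congrArg List.length ht
      simp [List.length_drop] at this
      omega
    have : j = r.length := by omega
    subst this; rfl
  | cons x rest ih =>
    have hjlen : j < r.length := by
      have := congrArg List.length ht
      simp [List.length_drop] at this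
      omega
    have hx : x = r.getD j 0 := by
      have h0 : (r.drop j)[0]'(by rw [← ht]; simp) = x := by simp [← ht]
      rw [List.getElem_drop] at h0
      rw [List.getD_eq_getElem r 0 (by omega)]
      simpa using h0.symm
    have hrest : rest = r.drop (j+1) := by
      have : r.drop (j+1) = (r.drop j).drop 1 := by rw [List.drop_drop]
      rw [this, ← ht, List.drop_one, List.tail_cons]
    rw [List.foldl_cons]
    have hS : (r.take (j+1)).sum = (r.take j).sum + r.getD j 0 := by
      rw [List.sum_take_succ r j hjlen, List.getD_eq_getElem r 0 hjlen]
    have hstate :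
        (((r.take j).sum - dRec r (j-1)) + x,
         min ((r.take j).sum - dRec r (j-2)) ((r.take j).sum - dRec r (j-1)))
        = ((r.take (j+1)).sum - dRec r ((j+1)-2), (r.take (j+1)).sum - dRec r ((j+1)-1)) := by
      obtain ⟨k, rfl⟩ : ∃ k, j = k + 2 := ⟨j - 2, by omega⟩
      have hdr : dRec r (k+2+1-1) = max (dRec r (k+1)) (dRec r k) + r.getD (k+2) 0 := rfl
      rw [Prod.mk.injEq]
      rw [show k+2-1 = k+1 from rfl, show k+2-2 = k from rfl,
          show k+2+1-2 = k+1 from rfl, hdr, hS, hx]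
      constructor <;> omega
    rw [hstate]
    exact ih (j+1) hrest (by omega) (by omega)

theorem B_eq (r : List Int) (h : 2 ≤ r.length) :
    maxRatings_alt r = max (dRec r (r.length - 1)) (dRec r (r.length - 2)) := by
  have hnil : r ≠ [] := by intro e; subst e; simp at h
  unfold maxRatings_alt
  rw [if_neg hnil, if_neg (by omega)]
  have hfold : r.foldl (fun (s : Int × Int) x => (s.2 + x, min s.1 s.2)) ((0:Int), (0:Int))
      = ((r.take r.length).sum - dRec r (r.length-2),
         (r.take r.length).sum - dRec r (r.length-1)) := by
    obtain ⟨a, b, t, rfl⟩ : ∃ a b t, r = a :: b :: t := by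
      match r, h with
      | a :: b :: t, _ => exact ⟨a, b, t, rfl⟩
    have hstart : ((min (0:Int) 0) + b, min ((0:Int)+a) (min (0:Int) 0))
        = (((a::b::t).take 2).sum - dRec (a::b::t) (2-2),
           ((a::b::t).take 2).sum - dRec (a::b::t) (2-1)) := by
      have h0 : dRec (a::b::t) 0 = a := rfl
      have h1 : dRec (a::b::t) 1 = max b (a+b) := by simp [dRec]
      have hs : ((a::b::t).take 2).sum = a + b := by simp
      rw [Prod.mk.injEq, show (2:Nat)-2 = 0 from rfl, show (2:Nat)-1 = 1 from rfl,
          h0, h1, hs]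
      constructor <;> omega
    show List.foldl _ ((min (0:Int) 0) + b, min ((0:Int)+a) (min (0:Int) 0)) t = _
    rw [hstart]
    exact loopB (a::b::t) t 2 rfl (by omega) (by simp)
  simp only [hfold, List.take_length]
  omega
-- ===== VERDICT (by name: the statement is the Claim_ definition above) =====
theorem maxRatings_spec : Claim_equal_maxRatings := by
  intro r _
  unfold Spec_maxRatings
  by_cases h2 : 2 ≤ r.length
  · rw [A_eq r h2, B_eq r h2]
  · unfold maxRatings maxRatings_alt
    by_cases hnil : r = []
    · rw [if_pos hnil, if_pos hnil]
    · rw [if_neg hnil, if_neg hnil, if_pos (by omega), if_pos (by omega)]
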